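-- pv_equiv track=rewrite | github.com/Jadalriyabi/LCproblems | Python Basics/sum78.py | sum78
-- ===== SOURCE A (Python) =====
-- def sum78(nums):
--
--     # Initialize sum to 0 and a flag to monitor if we are in a 7-8 section
--     total_sum = 0
--     in_section = False
--
--     for num in nums:
--         if num == 7:
--             # If we find a 7, set the flag to True to start ignoring numbers
--             in_section = True
--         elif num == 8 and in_section:
--             # If we find an 8 and we are in a section, end the section
--             in_section = False
--         elif not in_section:
--             # If we are not in a section, add the number to the sum
--             total_sum += num
--
--     return total_sum
-- ===== SOURCE B (Python) =====
-- def sum78(nums):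
--     # Index loop with inner skip instead of a carried boolean flag.
--     total = 0
--     i = 0
--     n = len(nums)
--     while i < n:
--         if nums[i] == 7:
--             i += 1
--             while i < n and nums[i] != 8:
--                 i += 1
--             i += 1  # step past the closing 8 (or off the end)
--         else:
--             total += nums[i]
--             i += 1
--     return total
-- ===== Notes on version B (the rewrite author's own statement) =====
-- stated objective: alternative
-- what changed: Replaced the carried in_section boolean state machine with an outer index scan that, upon a 7, runs an inner skip loop consuming everything up to and including the closing 8.
import Mathlib
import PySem

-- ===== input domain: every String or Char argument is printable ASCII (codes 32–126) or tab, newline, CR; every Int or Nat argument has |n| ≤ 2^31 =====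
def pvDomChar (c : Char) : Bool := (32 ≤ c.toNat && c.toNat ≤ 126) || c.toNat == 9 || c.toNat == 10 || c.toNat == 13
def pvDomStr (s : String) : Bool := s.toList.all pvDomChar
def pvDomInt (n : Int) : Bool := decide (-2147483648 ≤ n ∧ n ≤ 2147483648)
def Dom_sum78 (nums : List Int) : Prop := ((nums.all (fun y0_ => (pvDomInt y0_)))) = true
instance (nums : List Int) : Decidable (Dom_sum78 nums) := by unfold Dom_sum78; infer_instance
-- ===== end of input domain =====

-- B replaces A's carried in_section boolean with an outer scan plus an inner skip loop; same O(n) cost (objective: alternative).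

-- ===== PORT A =====
-- A: single fold carrying (total_sum, in_section)
def sum78Step (st : Int × Bool) (num : Int) : Int × Bool :=
  if num == 7 then (st.1, true)
  else if num == 8 && st.2 then (st.1, false)
  else if !st.2 then (st.1 + num, st.2)
  else st

def sum78 (nums : List Int) : Int :=
  (nums.foldl sum78Step ((0 : Int), false)).1

-- ===== PORT B =====
-- B's inner skip loop: drop elements up to and including the first 8
def sum78AltSkip : List Int → List Int
  | [] => []
  | x :: xs => if x == 8 then xs else sum78AltSkip xs

theorem sum78AltSkip_length_le (l : List Int) : (sum78AltSkip l).length ≤ l.length := by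
  induction l with
  | nil => simp [sum78AltSkip]
  | cons x xs ih =>
    simp only [sum78AltSkip]
    split
    · simp
    · exact Nat.le_succ_of_le ih

-- B's outer loop
def sum78AltGo : List Int → Int → Int
  | [], total => total
  | x :: xs, total =>
    if x == 7 then sum78AltGo (sum78AltSkip xs) total
    else sum78AltGo xs (total + x)
  termination_by l _ => l.length
  decreasing_by
  · exact Nat.lt_succ_of_le (sum78AltSkip_length_le xs)
  · exact Nat.lt_succ_self _

def sum78_alt (nums : List Int) : Int := sum78AltGo nums 0

-- ===== PRECONDITION & SPEC =====
def Spec_sum78 (nums : List Int) (out : Int) : Prop := out = sum78_alt nums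
instance (nums : List Int) (out : Int) : Decidable (Spec_sum78 nums out) := by unfold Spec_sum78; infer_instance

-- ===== CLAIM (what is proved, stated in full; the proofs are below) =====
def Claim_equal_sum78 : Prop := ∀ (nums : List Int), Dom_sum78 nums → Spec_sum78 nums (sum78 nums)

-- ===== LEMMAS AND PROOFS =====

-- While the flag is set, A's fold ignores everything until the first 8; that is exactly skipping sum78AltSkip.
theorem fold_true_eq_skip (l : List Int) (t : Int) :
    (l.foldl sum78Step (t, true)).1 = ((sum78AltSkip l).foldl sum78Step (t, false)).1 := by
  induction l generalizing t with
  | nil => simp [sum78AltSkip]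
  | cons x xs ih =>
    by_cases h7 : x = 7
    · subst h7
      simpa [sum78AltSkip, sum78Step] using ih t
    · by_cases h8 : x = 8
      · subst h8
        simp [sum78AltSkip, sum78Step]
      · simp only [List.foldl_cons, sum78Step, sum78AltSkip,
          show (x == 7) = false by simp [h7], show (x == 8) = false by simp [h8]]
        simpa using ih t

theorem fold_false_eq_go (l : List Int) (t : Int) :
    (l.foldl sum78Step (t, false)).1 = sum78AltGo l t := by
  induction hl : l.length using Nat.strong_induction_on generalizing l t with
  | _ n ih =>
    cases l with
    | nil => simp [sum78AltGo]
    | cons x xs =>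
      by_cases h7 : x = 7
      · subst h7
        have h1 : (xs.foldl sum78Step (t, true)).1
            = ((sum78AltSkip xs).foldl sum78Step (t, false)).1 := fold_true_eq_skip xs t
        have h2 : ((sum78AltSkip xs).foldl sum78Step (t, false)).1
            = sum78AltGo (sum78AltSkip xs) t := by
          subst hl
          exact ih (sum78AltSkip xs).length
            (Nat.lt_succ_of_le (sum78AltSkip_length_le xs)) _ t rfl
        simp only [List.foldl_cons, sum78Step, sum78AltGo]
        simpa using h1.trans h2
      · have h2 : (xs.foldl sum78Step (t + x, false)).1 = sum78AltGo xs (t + x) := by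
          subst hl
          exact ih xs.length (Nat.lt_succ_self _) _ _ rfl
        simp [List.foldl_cons, sum78Step, sum78AltGo, h7, h2]

-- ===== VERDICT (by name: the statement is the Claim_ definition above) =====
theorem sum78_spec : Claim_equal_sum78 := by
  intro nums _
  unfold Spec_sum78 sum78 sum78_alt
  exact fold_false_eq_go nums 0
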